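-- pv_equiv track=rewrite | github.com/pypi-data/pypi-mirror-246 | packages/colemen-utils/colemen_utils-2.23.101.tar.gz/colemen_utils-2.23.101/colemen_utilities/dict_utils/dict_utils.py | longest_key
-- ===== SOURCE A (Python) =====
-- def longest_key(data:dict)->tuple:
--     '''
--         Get the longest key in a dictionary.
--
--         ----------
--
--         Arguments
--         -------------------------
--         `data` {dict}
--             The dictionary of strings to search within.
--
--
--         Return {tuple}
--         ----------------------
--         If all strings are the same length, it will return the first one.
--         A tuple containing the longest length and its value.\n
--         (19,"kitties and titties")
--
--         If no strings are found in the list it will return this tuple:\n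
--         (0,None)
--
--
--         Meta
--         ----------
--         `author`: Colemen Atwood
--         `created`: 06-10-2022 06:16:30
--         `memberOf`: dict_utils
--         `version`: 1.0
--         `method_name`: longest_string
--         * @xxx [06-10-2022 06:19:29]: documentation for longest_string
--     '''
--     longest_len = 0
--     longest_val = None
--     for val in data.keys():
--         if isinstance(val,(str)):
--             val_len = len(val)
--             if val_len > longest_len:
--                 longest_len = val_len
--                 longest_val = val
--     return (longest_len,longest_val)
-- ===== SOURCE B (Python) =====
-- def longest_key(data: dict) -> tuple:
--     # Sort-then-select: stable descending sort by length, first element is the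
--     # first-occurring longest key. Empty keys are dropped: a length-0 key can
--     # never become the longest (A's strict '>' against an initial 0 skips them).
--     keys = [k for k in data.keys() if isinstance(k, str) and k]
--     if not keys:
--         return (0, None)
--     top = sorted(keys, key=len, reverse=True)[0]
--     return (len(top), top)
-- ===== Notes on version B (the rewrite author's own statement) =====
-- stated objective: alternative
-- what changed: Replaces the running-max loop with two accumulators by a filter of the non-empty string keys followed by a stable descending sort by length and selection of its first element.
import Mathlib
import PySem

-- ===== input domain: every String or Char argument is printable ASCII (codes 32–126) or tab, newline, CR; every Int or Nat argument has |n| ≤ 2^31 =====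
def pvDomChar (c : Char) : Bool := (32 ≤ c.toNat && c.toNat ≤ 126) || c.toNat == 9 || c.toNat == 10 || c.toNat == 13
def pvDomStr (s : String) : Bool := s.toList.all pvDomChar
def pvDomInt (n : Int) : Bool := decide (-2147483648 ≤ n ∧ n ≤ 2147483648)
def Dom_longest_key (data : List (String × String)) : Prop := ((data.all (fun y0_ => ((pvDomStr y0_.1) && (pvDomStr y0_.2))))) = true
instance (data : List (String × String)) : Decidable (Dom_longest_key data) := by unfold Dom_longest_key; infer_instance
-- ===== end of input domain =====

-- B replaces A's running-max loop by filtering the non-empty keys, stably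
-- sorting them by length in descending order and taking the first element
-- (same result; an alternative decomposition, not claimed faster).


-- ===== PORT A =====
-- isinstance(val, str) is always true here: the keys are typed String.
def longest_key (data : List (String × String)) : Int × Option String :=
  data.foldl
    (fun st p =>
      let val_len : Int := PySem.Str.len p.1
      if val_len > st.1 then (val_len, some p.1) else st)
    ((0 : Int), (none : Option String))

-- ===== PORT B =====
def longest_key_alt (data : List (String × String)) : Int × Option String :=
  let keys := (data.map (fun p => p.1)).filter (fun k => k != "")
  if keys = [] then (0, none)
  else
    match PySem.List.sorted keys (fun k => PySem.Str.len k) true with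
    | [] => (0, none)   -- unreachable: keys ≠ []
    | top :: _ => (PySem.Str.len top, some top)

-- ===== PRECONDITION & SPEC =====
def Spec_longest_key (data : List (String × String)) (out : Int × Option String) : Prop := out = longest_key_alt data
instance (data : List (String × String)) (out : Int × Option String) : Decidable (Spec_longest_key data out) := by unfold Spec_longest_key; infer_instance

-- ===== CLAIM (what is proved, stated in full; the proofs are below) =====
def Claim_equal_longest_key : Prop := ∀ (data : List (String × String)), Dom_longest_key data → Spec_longest_key data (longest_key data)

-- ===== LEMMAS AND PROOFS =====

-- the running champion: first element of maximal length, seeded with m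
def pvChamp (m : String) (ks : List String) : String :=
  ks.foldl (fun c x => if PySem.Str.len c < PySem.Str.len x then x else c) m

theorem pvLen_pos_iff (s : String) : 0 < PySem.Str.len s ↔ s ≠ "" := by
  simp only [PySem.Str.len, Int.natCast_pos, String.length_toList, Nat.pos_iff_ne_zero]
  exact not_congr String.length_eq_zero_iff

-- empty strings are no-ops for the champion fold
theorem pvChamp_filter (ks : List String) (m : String) :
    pvChamp m (ks.filter (fun k => k != "")) = pvChamp m ks := by
  induction ks generalizing m with
  | nil => rfl
  | cons x rest ih =>
    by_cases hx : x = ""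
    · subst hx
      simp [pvChamp, PySem.Str.len] at *
      exact ih m
    · simp [pvChamp, hx] at *
      exact ih _

-- head of insertBy into a nonempty accumulator
theorem pvInsertBy_cons (x m : String) (t : List String) :
    PySem.List.insertBy (fun a b => decide (PySem.Str.len b < PySem.Str.len a)) x (m :: t)
      = if PySem.Str.len m < PySem.Str.len x
        then x :: m :: t
        else m :: PySem.List.insertBy (fun a b => decide (PySem.Str.len b < PySem.Str.len a)) x t := by
  simp [PySem.List.insertBy]

theorem pvFoldl_insertBy_head (ks : List String) (m : String) (t : List String) :
    ∃ t', ks.foldl (fun acc x => PySem.List.insertBy (fun a b => decide (PySem.Str.len b < PySem.Str.len a)) x acc) (m :: t)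
      = pvChamp m ks :: t' := by
  induction ks generalizing m t with
  | nil => exact ⟨t, rfl⟩
  | cons x rest ih =>
    simp only [List.foldl_cons, pvInsertBy_cons, pvChamp]
    split_ifs with h
    · simpa only [pvChamp] using ih x (m :: t)
    · simpa only [pvChamp] using
        ih m (PySem.List.insertBy (fun a b => decide (PySem.Str.len b < PySem.Str.len a)) x t)

theorem pvSorted_rev_head (k : String) (rest : List String) :
    ∃ t, PySem.List.sorted (k :: rest) (fun s => PySem.Str.len s) true = pvChamp k rest :: t := by
  rw [PySem.List.sorted_rev_eq_foldl_insertBy]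
  have h0 : PySem.List.insertBy (fun a b => decide (PySem.Str.len b < PySem.Str.len a)) k [] = [k] := by
    simp [PySem.List.insertBy]
  simp only [List.foldl_cons, h0]
  exact pvFoldl_insertBy_head rest k []

-- A's fold from a nonempty champion state computes the champion
theorem pvFoldA_champ (ks : List String) (m : String) :
    ks.foldl (fun st x => if PySem.Str.len x > st.1 then (PySem.Str.len x, some x) else st)
        ((PySem.Str.len m : Int), (some m : Option String))
      = (PySem.Str.len (pvChamp m ks), some (pvChamp m ks)) := by
  induction ks generalizing m with
  | nil => rfl
  | cons x rest ih =>
    simp only [List.foldl_cons, pvChamp, gt_iff_lt]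
    split_ifs with h
    · simpa only [pvChamp] using ih x
    · simpa only [pvChamp] using ih m

theorem pvFoldA_main (ks : List String) :
    ks.foldl (fun st x => if PySem.Str.len x > st.1 then (PySem.Str.len x, some x) else st)
        ((0 : Int), (none : Option String))
      = match ks.filter (fun k => k != "") with
        | [] => ((0 : Int), (none : Option String))
        | k :: rest => (PySem.Str.len (pvChamp k rest), some (pvChamp k rest)) := by
  induction ks with
  | nil => rfl
  | cons x rest ih =>
    by_cases hx : x = ""
    · subst hx
      have h0 : ¬ (PySem.Str.len "" > (0 : Int)) := by simp [PySem.Str.len]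
      simpa [List.filter_cons, h0] using ih
    · have hpos : PySem.Str.len x > (0 : Int) := (pvLen_pos_iff x).mpr hx
      simp only [List.foldl_cons, if_pos hpos, List.filter_cons,
        if_pos (by simpa using hx : (x != "") = true)]
      rw [pvFoldA_champ rest x, ← pvChamp_filter rest x]

theorem pvFoldA_fst (data : List (String × String)) :
    longest_key data
      = (data.map (fun p => p.1)).foldl
          (fun st x => if PySem.Str.len x > st.1 then (PySem.Str.len x, some x) else st)
          ((0 : Int), (none : Option String)) := by
  simp [longest_key, List.foldl_map]

-- ===== VERDICT (by name: the statement is the Claim_ definition above) =====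
theorem longest_key_spec : Claim_equal_longest_key := by
  intro data _
  show longest_key data = longest_key_alt data
  rw [pvFoldA_fst, pvFoldA_main]
  simp only [longest_key_alt]
  cases hks : (data.map (fun p => p.1)).filter (fun k => k != "") with
  | nil => simp
  | cons k rest =>
    obtain ⟨t, ht⟩ := pvSorted_rev_head k rest
    rw [ht]
    simp
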